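-- pv_equiv track=rewrite | github.com/MrBrantCode/unitest_baseline | mut_generate/mist_train_cf/cf_14286/solution.py | count_words_excluding_test
-- ===== SOURCE A (Python) =====
-- def count_words_excluding_test(input_string):
--     """
--     Count the number of words in a given string, excluding any occurrences of the word "test" and its variations.
--
--     Args:
--         input_string (str): The input string.
--
--     Returns:
--         int: The word count excluding variations of "test".
--     """
--     test_variations = ["test", "testing", "tested"]
--     words = input_string.split()
--     word_count = 0
--     for word in words:
--         if word.lower() not in test_variations:
--             word_count += 1
--     return word_count
-- ===== SOURCE B (Python) =====
-- def count_words_excluding_test(input_string):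
--     lowered = [w.lower() for w in input_string.split()]
--     return len(lowered) - sum(lowered.count(v) for v in ("test", "testing", "tested"))
-- ===== Notes on version B (the rewrite author's own statement) =====
-- stated objective: alternative
-- what changed: B inverts the counting: it builds the lowercased word list once and returns total length minus the summed counts of the three excluded variations, instead of A's filter-and-increment loop.
import Mathlib
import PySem

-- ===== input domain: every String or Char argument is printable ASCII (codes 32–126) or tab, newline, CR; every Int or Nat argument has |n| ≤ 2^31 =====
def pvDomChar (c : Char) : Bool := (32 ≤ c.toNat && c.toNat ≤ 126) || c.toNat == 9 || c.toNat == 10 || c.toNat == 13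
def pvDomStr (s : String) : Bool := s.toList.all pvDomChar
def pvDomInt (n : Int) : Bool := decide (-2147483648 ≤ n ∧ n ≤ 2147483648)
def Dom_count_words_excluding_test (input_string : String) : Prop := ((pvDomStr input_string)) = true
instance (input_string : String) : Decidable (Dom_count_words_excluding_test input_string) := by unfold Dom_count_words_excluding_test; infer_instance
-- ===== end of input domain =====

-- B counts by subtraction (total words minus occurrences of the three excluded variations) instead of A's filter loop; same O(n) cost.

-- ===== PORT A =====
def count_words_excluding_test (input_string : String) : Int :=
  let test_variations : List String := ["test", "testing", "tested"]
  let words := PySem.Str.split₀ input_string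
  words.foldl (fun word_count word =>
    if PySem.Str.lower word ∈ test_variations then word_count else word_count + 1) 0

-- ===== PORT B =====
def count_words_excluding_test_alt (input_string : String) : Int :=
  let lowered := (PySem.Str.split₀ input_string).map PySem.Str.lower
  (lowered.length : Int) -
    (["test", "testing", "tested"].map (fun v => (lowered.count v : Int))).sum

-- ===== PRECONDITION & SPEC =====
def Spec_count_words_excluding_test (input_string : String) (out : Int) : Prop := out = count_words_excluding_test_alt input_string
instance (input_string : String) (out : Int) : Decidable (Spec_count_words_excluding_test input_string out) := by unfold Spec_count_words_excluding_test; infer_instance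

-- ===== CLAIM (what is proved, stated in full; the proofs are below) =====
def Claim_equal_count_words_excluding_test : Prop := ∀ (input_string : String), Dom_count_words_excluding_test input_string → Spec_count_words_excluding_test input_string (count_words_excluding_test input_string)

-- ===== LEMMAS AND PROOFS =====

-- loop invariant: A's fold over any word list equals length minus the three counts of lowered words
theorem pv_fold_eq_sub (l : List String) (a : Int) :
    l.foldl (fun word_count word =>
      if PySem.Str.lower word ∈ (["test", "testing", "tested"] : List String)
      then word_count else word_count + 1) a
    = a + ((l.map PySem.Str.lower).length : Int)
        - (((l.map PySem.Str.lower).count "test" : Int)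
           + ((l.map PySem.Str.lower).count "testing" : Int)
           + ((l.map PySem.Str.lower).count "tested" : Int)) := by
  induction l generalizing a with
  | nil => simp
  | cons w t ih =>
    simp only [List.foldl_cons, List.map_cons, List.length_cons, List.count_cons, ih]
    by_cases h : PySem.Str.lower w ∈ (["test", "testing", "tested"] : List String)
    · simp only [List.mem_cons, List.not_mem_nil, or_false] at h
      rcases h with h | h | h <;>
        simp [h] <;> ring
    · have h1 : ¬ (PySem.Str.lower w = "test") := fun hc => h (by simp [hc])
      have h2 : ¬ (PySem.Str.lower w = "testing") := fun hc => h (by simp [hc])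
      have h3 : ¬ (PySem.Str.lower w = "tested") := fun hc => h (by simp [hc])
      simp [h, h1, h2, h3]
      ring

-- ===== VERDICT (by name: the statement is the Claim_ definition above) =====
theorem count_words_excluding_test_spec : Claim_equal_count_words_excluding_test := by
  intro s _
  unfold Spec_count_words_excluding_test count_words_excluding_test count_words_excluding_test_alt
  simp only [pv_fold_eq_sub, List.map_cons, List.map_nil, List.sum_cons, List.sum_nil]
  ring
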